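-- pv_equiv track=rewrite | github.com/pypi-data/pypi-mirror-404 | packages/fast-agent-mcp/fast_agent_mcp-0.4.46.tar.gz/fast_agent_mcp-0.4.46/src/fast_agent/patch/seek_sequence.py | seek_sequence
-- ===== SOURCE A (Python) =====
-- def seek_sequence(
--     lines: list[str],
--     pattern: list[str],
--     start: int,
--     eof: bool,
-- ) -> int | None:
--     if not pattern:
--         return start
--     if len(pattern) > len(lines):
--         return None
--
--     search_start = len(lines) - len(pattern) if eof and len(lines) >= len(pattern) else start
--     last_start = len(lines) - len(pattern)
--
--     for index in range(search_start, last_start + 1):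
--         if lines[index : index + len(pattern)] == pattern:
--             return index
--
--     for index in range(search_start, last_start + 1):
--         if _matches_trim_end(lines, pattern, index):
--             return index
--
--     for index in range(search_start, last_start + 1):
--         if _matches_trim(lines, pattern, index):
--             return index
--
--     for index in range(search_start, last_start + 1):
--         if _matches_normalized(lines, pattern, index):
--             return index
--
--     return None
--
-- def _matches_trim_end(lines: list[str], pattern: list[str], index: int) -> bool:
--     for offset, pat in enumerate(pattern):
--         if lines[index + offset].rstrip() != pat.rstrip():
--             return False
--     return True
--
-- def _matches_trim(lines: list[str], pattern: list[str], index: int) -> bool: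
--     for offset, pat in enumerate(pattern):
--         if lines[index + offset].strip() != pat.strip():
--             return False
--     return True
--
-- def _matches_normalized(lines: list[str], pattern: list[str], index: int) -> bool:
--     for offset, pat in enumerate(pattern):
--         if _normalise(lines[index + offset]) != _normalise(pat):
--             return False
--     return True
--
-- def _normalise(value: str) -> str:
--     mapping = {
--         "\u2010": "-",
--         "\u2011": "-",
--         "\u2012": "-",
--         "\u2013": "-",
--         "\u2014": "-",
--         "\u2015": "-",
--         "\u2212": "-",
--         "\u2018": "'",
--         "\u2019": "'",
--         "\u201A": "'",
--         "\u201B": "'",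
--         "\u201C": '"',
--         "\u201D": '"',
--         "\u201E": '"',
--         "\u201F": '"',
--         "\u00A0": " ",
--         "\u2002": " ",
--         "\u2003": " ",
--         "\u2004": " ",
--         "\u2005": " ",
--         "\u2006": " ",
--         "\u2007": " ",
--         "\u2008": " ",
--         "\u2009": " ",
--         "\u200A": " ",
--         "\u202F": " ",
--         "\u205F": " ",
--         "\u3000": " ",
--     }
--     return "".join(mapping.get(ch, ch) for ch in value.strip())
-- ===== SOURCE B (Python) =====
-- # B: single forward pass tracking the lexicographically best (tier, index) pair,
-- # with per-line keys (raw, rstrip, strip, normalised) precomputed once,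
-- # instead of A's four full scans that re-normalise every window.
--
-- _TABLE = str.maketrans({
--     "\u2010": "-", "\u2011": "-", "\u2012": "-", "\u2013": "-", "\u2014": "-",
--     "\u2015": "-", "\u2212": "-",
--     "\u2018": "'", "\u2019": "'", "\u201A": "'", "\u201B": "'",
--     "\u201C": '"', "\u201D": '"', "\u201E": '"', "\u201F": '"',
--     "\u00A0": " ", "\u2002": " ", "\u2003": " ", "\u2004": " ", "\u2005": " ",
--     "\u2006": " ", "\u2007": " ", "\u2008": " ", "\u2009": " ", "\u200A": " ",
--     "\u202F": " ", "\u205F": " ", "\u3000": " ",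
-- })
--
--
-- def _keys(s):
--     stripped = s.strip()
--     return (s, s.rstrip(), stripped, stripped.translate(_TABLE))
--
--
-- def _level(line_keys, pat_keys, i, ub):
--     for k in range(ub):
--         ok = True
--         for o in range(len(pat_keys)):
--             if line_keys[i + o][k] != pat_keys[o][k]:
--                 ok = False
--                 break
--         if ok:
--             return k
--     return None
--
--
-- def seek_sequence(lines, pattern, start, eof):
--     if not pattern:
--         return start
--     n, m = len(lines), len(pattern)
--     if m > n:
--         return None
--
--     search_start = n - m if eof and n >= m else start
--     line_keys = [_keys(s) for s in lines]
--     pat_keys = [_keys(s) for s in pattern]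
--
--     best = None
--     best_idx = None
--     for i in range(search_start, n - m + 1):
--         lv = _level(line_keys, pat_keys, i, 4 if best is None else best)
--         if lv is not None:
--             best, best_idx = lv, i
--             if best == 0:
--                 break
--     return best_idx
-- ===== Notes on version B (the rewrite author's own statement) =====
-- stated objective: alternative
-- what changed: A makes four full passes over the window positions (exact, rstrip, strip, normalised), re-trimming and re-normalising every line of every window per pass; B precomputes the four keys of every line once and makes one pass that tracks the lexicographically best (tier, index) pair, probing each position only for tiers strictly better than the best found so far and stopping on an exact match.
-- outside the precondition, e.g. on seek_sequence(['x', 'y'], ['y'], -5, False): A returns 1, B raises IndexError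
import Mathlib
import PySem

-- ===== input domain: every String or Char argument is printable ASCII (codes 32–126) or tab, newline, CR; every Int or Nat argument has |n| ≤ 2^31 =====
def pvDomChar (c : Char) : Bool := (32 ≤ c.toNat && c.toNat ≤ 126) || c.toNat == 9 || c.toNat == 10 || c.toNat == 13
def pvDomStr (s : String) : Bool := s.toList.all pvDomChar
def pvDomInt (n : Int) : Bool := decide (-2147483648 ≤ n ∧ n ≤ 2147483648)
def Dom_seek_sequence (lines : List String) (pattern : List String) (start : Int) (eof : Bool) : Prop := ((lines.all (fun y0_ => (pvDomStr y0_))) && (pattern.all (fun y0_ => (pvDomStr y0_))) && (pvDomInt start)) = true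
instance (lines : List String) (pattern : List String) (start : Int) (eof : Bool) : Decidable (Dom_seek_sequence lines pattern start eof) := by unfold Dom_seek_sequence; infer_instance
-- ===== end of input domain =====

-- B replaces A's four per-tier scans (which re-trim/re-normalise every window line per pass)
-- by one pass over precomputed per-line keys that tracks the lexicographically best (tier, index) pair.

-- ===== PORT A =====
-- the literal translation table of _normalise's dict (dict.get ch ch = first-match lookup with default)
def pvMappingList : List (Char × Char) :=
  [('\u2010', '-'), ('\u2011', '-'), ('\u2012', '-'), ('\u2013', '-'), ('\u2014', '-'),
   ('\u2015', '-'), ('\u2212', '-'),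
   ('\u2018', '\''), ('\u2019', '\''), ('\u201A', '\''), ('\u201B', '\''),
   ('\u201C', '"'), ('\u201D', '"'), ('\u201E', '"'), ('\u201F', '"'),
   ('\u00A0', ' '), ('\u2002', ' '), ('\u2003', ' '), ('\u2004', ' '), ('\u2005', ' '),
   ('\u2006', ' '), ('\u2007', ' '), ('\u2008', ' '), ('\u2009', ' '), ('\u200A', ' '),
   ('\u202F', ' '), ('\u205F', ' '), ('\u3000', ' ')]

def pvNormChar (c : Char) : Char := (pvMappingList.lookup c).getD c

-- _normalise: "".join(mapping.get(ch, ch) for ch in value.strip())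
def pvNormalise (v : String) : String :=
  String.ofList (((PySem.Str.strip v).toList).map pvNormChar)

-- _matches_trim_end (pyGet? none = IndexError in Python; those inputs are outside Pre_)
def pvMatchesTrimEnd (lines : List String) (pattern : List String) (index : Int) : Bool :=
  (PySem.List.enumerate pattern 0).all (fun op =>
    match PySem.List.pyGet? lines (index + op.1) with
    | some s => PySem.Str.rstrip s == PySem.Str.rstrip op.2
    | none => false)

-- _matches_trim
def pvMatchesTrim (lines : List String) (pattern : List String) (index : Int) : Bool :=
  (PySem.List.enumerate pattern 0).all (fun op =>
    match PySem.List.pyGet? lines (index + op.1) with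
    | some s => PySem.Str.strip s == PySem.Str.strip op.2
    | none => false)

-- _matches_normalized
def pvMatchesNormalized (lines : List String) (pattern : List String) (index : Int) : Bool :=
  (PySem.List.enumerate pattern 0).all (fun op =>
    match PySem.List.pyGet? lines (index + op.1) with
    | some s => pvNormalise s == pvNormalise op.2
    | none => false)

def seek_sequence (lines : List String) (pattern : List String) (start : Int) (eof : Bool) : Option Int :=
  if pattern = [] then some start
  else if lines.length < pattern.length then none
  else
    let n : Int := lines.length
    let m : Int := pattern.length
    let search_start : Int := if eof && decide (pattern.length ≤ lines.length) then n - m else start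
    let last_start : Int := n - m
    let idxs := PySem.List.pyRange search_start (last_start + 1) 1
    match idxs.find? (fun i => PySem.List.slice lines (some i) (some (i + m)) == pattern) with
    | some i => some i
    | none =>
      match idxs.find? (fun i => pvMatchesTrimEnd lines pattern i) with
      | some i => some i
      | none =>
        match idxs.find? (fun i => pvMatchesTrim lines pattern i) with
        | some i => some i
        | none =>
          match idxs.find? (fun i => pvMatchesNormalized lines pattern i) with
          | some i => some i
          | none => none

-- ===== PORT B =====
-- _keys: (s, s.rstrip(), stripped, stripped.translate(_TABLE))
def pvKeys (s : String) : String × String × String × String :=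
  let stripped := PySem.Str.strip s
  (s, PySem.Str.rstrip s, stripped, String.ofList (stripped.toList.map pvNormChar))

def pvKeyAt (t : String × String × String × String) : Nat → String
  | 0 => t.1
  | 1 => t.2.1
  | 2 => t.2.2.1
  | _ => t.2.2.2

-- the inner 'ok' loop of _level for one tier k
def pvMatchK (lineKeys patKeys : List (String × String × String × String)) (i : Int) (k : Nat) : Bool :=
  (List.range patKeys.length).all (fun o =>
    match PySem.List.pyGet? lineKeys (i + (o : Int)) with
    | some t => pvKeyAt t k == pvKeyAt (patKeys.getD o ("", "", "", "")) k
    | none => false)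

-- _level(line_keys, pat_keys, i, ub): first k < ub whose tier matches
def pvLevel (lineKeys patKeys : List (String × String × String × String)) (i : Int) (ub : Nat) : Option Nat :=
  (List.range ub).find? (pvMatchK lineKeys patKeys i)

-- the main for-loop of B: best/best_idx accumulator, break on best == 0
def pvScan (lineKeys patKeys : List (String × String × String × String)) :
    List Int → Option Nat → Option Int → Option Int
  | [], _, bestIdx => bestIdx
  | i :: rest, best, bestIdx =>
    match pvLevel lineKeys patKeys i (match best with | none => 4 | some b => b) with
    | some v => if v = 0 then some i else pvScan lineKeys patKeys rest (some v) (some i)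
    | none => pvScan lineKeys patKeys rest best bestIdx

def seek_sequence_alt (lines : List String) (pattern : List String) (start : Int) (eof : Bool) : Option Int :=
  if pattern = [] then some start
  else if lines.length < pattern.length then none
  else
    let n : Int := lines.length
    let m : Int := pattern.length
    let search_start : Int := if eof && decide (pattern.length ≤ lines.length) then n - m else start
    let lineKeys := lines.map pvKeys
    let patKeys := pattern.map pvKeys
    pvScan lineKeys patKeys (PySem.List.pyRange search_start (n - m + 1) 1) none none

-- ===== PRECONDITION & SPEC =====
-- Pre_ excludes a negative start when start actually governs the search (pattern nonempty and
-- fitting, no eof override): there Python's negative-index wraparound makes A's fallback matchers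
-- return accidental negative indices or raise IndexError, and B's own indexing raises likewise.
def Pre_seek_sequence (lines : List String) (pattern : List String) (start : Int) (eof : Bool) : Prop :=
  0 ≤ start ∨ eof = true ∨ pattern = [] ∨ lines.length < pattern.length
instance (lines : List String) (pattern : List String) (start : Int) (eof : Bool) : Decidable (Pre_seek_sequence lines pattern start eof) := by unfold Pre_seek_sequence; infer_instance

def pvWitness_seek_sequence : List String × List String × Int × Bool := (["a ", "b"], ["a"], 0, false)

def Spec_seek_sequence (lines : List String) (pattern : List String) (start : Int) (eof : Bool) (out : Option Int) : Prop := out = seek_sequence_alt lines pattern start eof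
instance (lines : List String) (pattern : List String) (start : Int) (eof : Bool) (out : Option Int) : Decidable (Spec_seek_sequence lines pattern start eof out) := by unfold Spec_seek_sequence; infer_instance

-- ===== CLAIM (what is proved, stated in full; the proofs are below) =====
def Claim_equal_seek_sequence : Prop := ∀ (lines : List String) (pattern : List String) (start : Int) (eof : Bool), Dom_seek_sequence lines pattern start eof → Pre_seek_sequence lines pattern start eof → Spec_seek_sequence lines pattern start eof (seek_sequence lines pattern start eof)

-- ===== LEMMAS AND PROOFS =====

-- canonical pointwise form of "window at i matches pattern under key f"
def pvPt (f : String → String) (lines pattern : List String) (i : Int) : Bool :=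
  decide (∀ o < pattern.length, f (lines.getD (i.toNat + o) "") = f (pattern.getD o ""))

lemma pvMatchesWith_eq (f : String → String) (lines pattern : List String) (i : Int)
    (hi : 0 ≤ i) (hb : i.toNat + pattern.length ≤ lines.length) :
    ((PySem.List.enumerate pattern 0).all (fun op =>
      match PySem.List.pyGet? lines (i + op.1) with
      | some s => f s == f op.2
      | none => false))
    = pvPt f lines pattern i := by
  rw [PySem.List.enumerate_eq_map_pyRange pattern "", PySem.List.pyRange_one, List.all_map, List.all_map]
  simp only [PySem.List.len_eq, Int.sub_zero, Int.toNat_natCast] at *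
  rw [pvPt, Bool.eq_iff_iff, List.all_eq_true, decide_eq_true_eq]
  constructor
  · intro h o ho
    have := h o (List.mem_range.mpr ho)
    simp only [Function.comp_apply, Int.zero_add] at this ⊢
    rw [PySem.List.pyGet?_of_nonneg _ (by omega), PySem.List.pyGetD_natCast] at this
    have ht : (i + (o : Int)).toNat = i.toNat + o := by omega
    rw [ht] at this
    have hlt : i.toNat + o < lines.length := by omega
    rw [List.getElem?_eq_getElem hlt] at this
    simpa [List.getD_eq_getElem?_getD, List.getElem?_eq_getElem hlt] using this
  · intro h o ho
    have ho' := List.mem_range.mp ho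
    have := h o ho'
    simp only [Function.comp_apply, Int.zero_add]
    rw [PySem.List.pyGet?_of_nonneg _ (by omega), PySem.List.pyGetD_natCast]
    have ht : (i + (o : Int)).toNat = i.toNat + o := by omega
    rw [ht]
    have hlt : i.toNat + o < lines.length := by omega
    rw [List.getElem?_eq_getElem hlt]
    simpa [List.getD_eq_getElem?_getD, List.getElem?_eq_getElem hlt] using this

lemma pvSlice_eq (lines pattern : List String) (i : Int)
    (hi : 0 ≤ i) (hb : i.toNat + pattern.length ≤ lines.length) :
    (PySem.List.slice lines (some i) (some (i + (pattern.length : Int))) == pattern)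
    = pvPt id lines pattern i := by
  rw [PySem.List.slice_toNat lines hi (by omega)]
  have ht : (i + (pattern.length : Int)).toNat - i.toNat = pattern.length := by omega
  rw [ht, pvPt, Bool.eq_iff_iff, beq_iff_eq, decide_eq_true_eq]
  have hlen : ((lines.drop i.toNat).take pattern.length).length = pattern.length := by
    simp; omega
  constructor
  · intro h o ho
    have : ((lines.drop i.toNat).take pattern.length)[o]'(by omega) = pattern[o]'(ho) := by
      simp [h]
    rw [List.getElem_take, List.getElem_drop] at this
    simp only [id]
    rw [List.getD_eq_getElem _ _ (by omega : i.toNat + o < lines.length),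
        List.getD_eq_getElem _ _ ho]
    exact this
  · intro h
    apply List.ext_getElem (by rw [hlen])
    intro o h1 h2
    have := h o h2
    simp only [id] at this
    rw [List.getD_eq_getElem _ _ (by omega : i.toNat + o < lines.length),
        List.getD_eq_getElem _ _ h2] at this
    rw [List.getElem_take, List.getElem_drop]
    exact this

lemma pvMatchK_eq (lines pattern : List String) (i : Int) (k : Nat)
    (hi : 0 ≤ i) (hb : i.toNat + pattern.length ≤ lines.length) :
    pvMatchK (lines.map pvKeys) (pattern.map pvKeys) i k
    = pvPt (fun s => pvKeyAt (pvKeys s) k) lines pattern i := by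
  rw [pvMatchK, pvPt, Bool.eq_iff_iff, List.all_eq_true, decide_eq_true_eq]
  simp only [List.length_map]
  constructor
  · intro h o ho
    have := h o (List.mem_range.mpr ho)
    rw [PySem.List.pyGet?_of_nonneg _ (by omega)] at this
    have ht : (i + (o : Int)).toNat = i.toNat + o := by omega
    have hlt : i.toNat + o < lines.length := by omega
    rw [ht, List.getElem?_map, List.getElem?_eq_getElem hlt] at this
    simp only [Option.map_some] at this
    rw [List.getD_eq_getElem?_getD, List.getElem?_map, List.getElem?_eq_getElem ho] at this
    simp only [Option.map_some, Option.getD_some, beq_iff_eq] at this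
    rw [List.getD_eq_getElem _ _ hlt, List.getD_eq_getElem _ _ ho]
    exact this
  · intro h o ho
    have ho' := List.mem_range.mp ho
    have := h o ho'
    rw [PySem.List.pyGet?_of_nonneg _ (by omega)]
    have ht : (i + (o : Int)).toNat = i.toNat + o := by omega
    have hlt : i.toNat + o < lines.length := by omega
    rw [ht, List.getElem?_map, List.getElem?_eq_getElem hlt]
    simp only [Option.map_some]
    rw [List.getD_eq_getElem?_getD, List.getElem?_map, List.getElem?_eq_getElem ho']
    simp only [Option.map_some, Option.getD_some, beq_iff_eq]
    rw [List.getD_eq_getElem _ _ hlt, List.getD_eq_getElem _ _ ho'] at this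
    exact this

-- strip factors through rstrip: rstrip (lstrip s) = lstrip (rstrip s)
lemma pvDropWhile_comm {α : Type} (p : α → Bool) (s : List α) :
    (List.dropWhile p ((List.dropWhile p s).reverse)).reverse
    = List.dropWhile p ((List.dropWhile p s.reverse).reverse) := by
  cases hm : List.dropWhile p s with
  | nil =>
    have hall : ∀ x ∈ s, p x = true := List.dropWhile_eq_nil_iff.mp hm
    have h2 : List.dropWhile p s.reverse = [] :=
      List.dropWhile_eq_nil_iff.mpr (fun x hx => hall x (List.mem_reverse.mp hx))
    simp [h2]
  | cons c t =>
    have hne : List.dropWhile p s ≠ [] := by rw [hm]; simp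
    have hc : p c = false := by
      have := List.head_dropWhile_not p hne
      simpa [hm] using this
    have hs : List.takeWhile p s ++ (c :: t) = s := by
      rw [← hm]; exact List.takeWhile_append_dropWhile
    obtain ⟨v, hv⟩ : ∃ v, List.dropWhile p (t.reverse ++ [c]) = v ++ [c] := by
      rw [List.dropWhile_append]
      cases he : List.dropWhile p t.reverse with
      | nil => exact ⟨[], by simp [hc]⟩
      | cons a u => exact ⟨a :: u, by simp⟩
    have hrev : s.reverse = (t.reverse ++ [c]) ++ (List.takeWhile p s).reverse := by
      conv_lhs => rw [← hs]
      simp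
    have hdrop : List.dropWhile p s.reverse = (v ++ [c]) ++ (List.takeWhile p s).reverse := by
      rw [hrev, List.dropWhile_append, hv]
      simp
    have htk : List.dropWhile p (List.takeWhile p s) = [] :=
      List.dropWhile_eq_nil_iff.mpr (fun x hx => List.mem_takeWhile_imp hx)
    rw [hdrop]
    have hre : ((v ++ [c]) ++ (List.takeWhile p s).reverse).reverse
        = List.takeWhile p s ++ (c :: v.reverse) := by simp
    rw [hre, List.dropWhile_append, htk]
    simp [hc, hv]

lemma pvStrip_factor (s : List Char) :
    PySem.Chars.strip s = PySem.Chars.lstrip (PySem.Chars.rstrip s) := by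
  simp only [PySem.Chars.strip, PySem.Chars.rstrip, PySem.Chars.lstrip]
  exact pvDropWhile_comm PySem.Chars.isspace s

lemma pvStrip_of_rstrip {x y : String}
    (h : PySem.Str.rstrip x = PySem.Str.rstrip y) : PySem.Str.strip x = PySem.Str.strip y := by
  have h' : PySem.Chars.rstrip x.toList = PySem.Chars.rstrip y.toList := by
    have := congrArg String.toList h
    simpa [PySem.Str.toList_rstrip] using this
  unfold PySem.Str.strip
  rw [pvStrip_factor, pvStrip_factor, h']

lemma pvNorm_of_strip {x y : String}
    (h : PySem.Str.strip x = PySem.Str.strip y) : pvNormalise x = pvNormalise y := by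
  unfold pvNormalise
  rw [h]

lemma pvPt_mono01 (lines pattern : List String) (i : Int)
    (h : pvPt (fun s => pvKeyAt (pvKeys s) 0) lines pattern i = true) :
    pvPt (fun s => pvKeyAt (pvKeys s) 1) lines pattern i = true := by
  simp only [pvPt, decide_eq_true_eq] at h ⊢
  intro o ho
  exact congrArg PySem.Str.rstrip (h o ho)

lemma pvPt_mono12 (lines pattern : List String) (i : Int)
    (h : pvPt (fun s => pvKeyAt (pvKeys s) 1) lines pattern i = true) :
    pvPt (fun s => pvKeyAt (pvKeys s) 2) lines pattern i = true := by
  simp only [pvPt, decide_eq_true_eq] at h ⊢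
  intro o ho
  exact pvStrip_of_rstrip (h o ho)

lemma pvPt_mono23 (lines pattern : List String) (i : Int)
    (h : pvPt (fun s => pvKeyAt (pvKeys s) 2) lines pattern i = true) :
    pvPt (fun s => pvKeyAt (pvKeys s) 3) lines pattern i = true := by
  simp only [pvPt, decide_eq_true_eq] at h ⊢
  intro o ho
  exact pvNorm_of_strip (h o ho)

lemma pvFind?_congr {α : Type} (L : List α) (p q : α → Bool)
    (h : ∀ x ∈ L, p x = q x) : L.find? p = L.find? q := by
  induction L with
  | nil => rfl
  | cons a t ih =>
    simp only [List.find?_cons, h a (by simp)]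
    cases hq : q a
    · exact ih (fun x hx => h x (by simp [hx]))
    · rfl

-- the single pass of B equals the four chained searches, given tier monotonicity on L
lemma pvScan_eq (lk pk : List (String × String × String × String)) (L : List Int)
    (Hm : ∀ i ∈ L, (pvMatchK lk pk i 0 = true → pvMatchK lk pk i 1 = true) ∧
                   (pvMatchK lk pk i 1 = true → pvMatchK lk pk i 2 = true) ∧
                   (pvMatchK lk pk i 2 = true → pvMatchK lk pk i 3 = true)) :
    (pvScan lk pk L none none
      = ((L.find? (fun i => pvMatchK lk pk i 0)).orElse (fun _ =>
          (L.find? (fun i => pvMatchK lk pk i 1)).orElse (fun _ =>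
            (L.find? (fun i => pvMatchK lk pk i 2)).orElse (fun _ =>
              L.find? (fun i => pvMatchK lk pk i 3))))))
    ∧ (∀ j, pvScan lk pk L (some 1) (some j)
      = ((L.find? (fun i => pvMatchK lk pk i 0)).orElse (fun _ => some j)))
    ∧ (∀ j, pvScan lk pk L (some 2) (some j)
      = ((L.find? (fun i => pvMatchK lk pk i 0)).orElse (fun _ =>
          (L.find? (fun i => pvMatchK lk pk i 1)).orElse (fun _ => some j))))
    ∧ (∀ j, pvScan lk pk L (some 3) (some j)
      = ((L.find? (fun i => pvMatchK lk pk i 0)).orElse (fun _ =>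
          (L.find? (fun i => pvMatchK lk pk i 1)).orElse (fun _ =>
            (L.find? (fun i => pvMatchK lk pk i 2)).orElse (fun _ => some j))))) := by
  induction L with
  | nil => simp [pvScan]
  | cons a t ih =>
    have Hma := Hm a (by simp)
    obtain ⟨IH4, IH1, IH2, IH3⟩ := ih (fun x hx => Hm x (by simp [hx]))
    by_cases h0 : pvMatchK lk pk a 0 = true
    · have h1 := Hma.1 h0
      have h2 := Hma.2.1 h1
      have h3 := Hma.2.2 h2
      refine ⟨?_, fun j => ?_, fun j => ?_, fun j => ?_⟩ <;>
        simp [pvScan, pvLevel, h0, h1, h2, h3, List.range_succ]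
    · have hf0 : pvMatchK lk pk a 0 = false := by simpa using h0
      by_cases h1 : pvMatchK lk pk a 1 = true
      · have h2 := Hma.2.1 h1
        have h3 := Hma.2.2 h2
        refine ⟨?_, fun j => ?_, fun j => ?_, fun j => ?_⟩ <;>
          simp [pvScan, pvLevel, hf0, h1, List.range_succ, IH1]
      · have hf1 : pvMatchK lk pk a 1 = false := by simpa using h1
        by_cases h2 : pvMatchK lk pk a 2 = true
        · have h3 := Hma.2.2 h2
          refine ⟨?_, fun j => ?_, fun j => ?_, fun j => ?_⟩ <;>
            simp [pvScan, pvLevel, List.find?_cons, hf0, hf1, h2, List.range_succ, IH1, IH2]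
        · have hf2 : pvMatchK lk pk a 2 = false := by simpa using h2
          by_cases h3 : pvMatchK lk pk a 3 = true
          · refine ⟨?_, fun j => ?_, fun j => ?_, fun j => ?_⟩ <;>
              simp [pvScan, pvLevel, hf0, hf1, hf2, h3, List.range_succ, IH1, IH2, IH3]
          · have hf3 : pvMatchK lk pk a 3 = false := by simpa using h3
            refine ⟨?_, fun j => ?_, fun j => ?_, fun j => ?_⟩ <;>
              simp [pvScan, pvLevel, hf0, hf1, hf2, hf3, List.range_succ, IH1, IH2, IH3, IH4]


lemma pvMatch_orElse (o : Option Int) (e : Option Int) :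
    (match o with | some i => some i | none => e) = o.orElse (fun _ => e) := by
  cases o <;> rfl

lemma pvMatch_id (o : Option Int) :
    (match o with | some i => some i | none => none) = o := by
  cases o <;> rfl

-- ===== VERDICT (by name: the statement is the Claim_ definition above) =====
theorem seek_sequence_spec : Claim_equal_seek_sequence := by
  intro lines pattern start eof _hdom hpre
  show seek_sequence lines pattern start eof = seek_sequence_alt lines pattern start eof
  by_cases hp : pattern = []
  · simp [seek_sequence, seek_sequence_alt, hp]
  · by_cases hlen : lines.length < pattern.length
    · simp [seek_sequence, seek_sequence_alt, hp, hlen]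
    · have hmn : pattern.length ≤ lines.length := by omega
      simp only [seek_sequence, seek_sequence_alt, if_neg hp, if_neg hlen]
      set s : Int := if eof && decide (pattern.length ≤ lines.length)
          then (lines.length : Int) - (pattern.length : Int) else start with hs
      have hs0 : 0 ≤ s := by
        cases heof : eof with
        | true => simp only [hs, heof, decide_eq_true hmn, Bool.and_self, if_true]; omega
        | false =>
          have hst : 0 ≤ start := by
            rcases hpre with h | h | h | h
            · exact h
            · rw [heof] at h; exact absurd h (by simp)
            · exact absurd h hp
            · omega
          simpa [hs, heof] using hst
      set L := PySem.List.pyRange s ((lines.length : Int) - (pattern.length : Int) + 1) 1 with hL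
      have hmem : ∀ i ∈ L, 0 ≤ i ∧ i.toNat + pattern.length ≤ lines.length := by
        intro i hi
        rw [hL, PySem.List.mem_pyRange_one] at hi
        omega
      have e0 : L.find? (fun i => PySem.List.slice lines (some i) (some (i + (pattern.length : Int))) == pattern)
          = L.find? (fun i => pvMatchK (lines.map pvKeys) (pattern.map pvKeys) i 0) := by
        refine pvFind?_congr L _ _ (fun i hi => ?_)
        obtain ⟨h1, h2⟩ := hmem i hi
        rw [pvSlice_eq lines pattern i h1 h2, pvMatchK_eq lines pattern i 0 h1 h2]
        rfl
      have e1 : L.find? (fun i => pvMatchesTrimEnd lines pattern i)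
          = L.find? (fun i => pvMatchK (lines.map pvKeys) (pattern.map pvKeys) i 1) := by
        refine pvFind?_congr L _ _ (fun i hi => ?_)
        obtain ⟨h1, h2⟩ := hmem i hi
        rw [show pvMatchesTrimEnd lines pattern i
              = pvPt PySem.Str.rstrip lines pattern i from
            pvMatchesWith_eq PySem.Str.rstrip lines pattern i h1 h2,
           pvMatchK_eq lines pattern i 1 h1 h2]
        rfl
      have e2 : L.find? (fun i => pvMatchesTrim lines pattern i)
          = L.find? (fun i => pvMatchK (lines.map pvKeys) (pattern.map pvKeys) i 2) := by
        refine pvFind?_congr L _ _ (fun i hi => ?_)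
        obtain ⟨h1, h2⟩ := hmem i hi
        rw [show pvMatchesTrim lines pattern i
              = pvPt PySem.Str.strip lines pattern i from
            pvMatchesWith_eq PySem.Str.strip lines pattern i h1 h2,
           pvMatchK_eq lines pattern i 2 h1 h2]
        rfl
      have e3 : L.find? (fun i => pvMatchesNormalized lines pattern i)
          = L.find? (fun i => pvMatchK (lines.map pvKeys) (pattern.map pvKeys) i 3) := by
        refine pvFind?_congr L _ _ (fun i hi => ?_)
        obtain ⟨h1, h2⟩ := hmem i hi
        rw [show pvMatchesNormalized lines pattern i
              = pvPt pvNormalise lines pattern i from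
            pvMatchesWith_eq pvNormalise lines pattern i h1 h2,
           pvMatchK_eq lines pattern i 3 h1 h2]
        rfl
      have Hm : ∀ i ∈ L,
          (pvMatchK (lines.map pvKeys) (pattern.map pvKeys) i 0 = true →
            pvMatchK (lines.map pvKeys) (pattern.map pvKeys) i 1 = true) ∧
          (pvMatchK (lines.map pvKeys) (pattern.map pvKeys) i 1 = true →
            pvMatchK (lines.map pvKeys) (pattern.map pvKeys) i 2 = true) ∧
          (pvMatchK (lines.map pvKeys) (pattern.map pvKeys) i 2 = true →
            pvMatchK (lines.map pvKeys) (pattern.map pvKeys) i 3 = true) := by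
        intro i hi
        obtain ⟨h1, h2⟩ := hmem i hi
        rw [pvMatchK_eq lines pattern i 0 h1 h2, pvMatchK_eq lines pattern i 1 h1 h2,
            pvMatchK_eq lines pattern i 2 h1 h2, pvMatchK_eq lines pattern i 3 h1 h2]
        exact ⟨pvPt_mono01 lines pattern i, pvPt_mono12 lines pattern i, pvPt_mono23 lines pattern i⟩
      obtain ⟨S4, -, -, -⟩ := pvScan_eq (lines.map pvKeys) (pattern.map pvKeys) L Hm
      rw [e0, e1, e2, e3, S4, pvMatch_id, pvMatch_orElse, pvMatch_orElse, pvMatch_orElse]
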